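-- pv_equiv track=rewrite | github.com/joestalker1/leetcode | src/main/scala/SearchSuggestionsSystem.py | search_first_min_word
-- ===== SOURCE A (Python) =====
-- def search_first_min_word(products, word):
--     s = 0
--     e = len(products) - 1
--     while s <= e:
--         m = s + (e - s)// 2
--         min_len = min(len(word), len(products[m]))
--         prefix = products[m][:len(word)]
--         if prefix == word:
--             #return index of starting word
--             l = m - 1
--             while l >= 0 and len(products[l]) >= len(word) and products[l][:len(word)] == word:
--                 l -= 1
--             l += 1
--             return l
--         if prefix < word:
--             s = m + 1
--         else:
--             e = m - 1
--     return -1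
-- ===== SOURCE B (Python) =====
-- def search_first_min_word(products, word):
--     k = len(word)
--
--     def matches(p):
--         return p[:k] == word
--
--     def start_of_run(j):
--         # count consecutive matching products ending at index j, scanning backwards
--         cnt = 0
--         for p in products[:j + 1][::-1]:
--             if not matches(p):
--                 break
--             cnt += 1
--         return j + 1 - cnt
--
--     def go(offset, xs):
--         # divide and conquer on the sublist xs = products[offset : offset+len(xs)]
--         if not xs:
--             return -1
--         m = (len(xs) - 1) // 2
--         if matches(xs[m]):
--             return start_of_run(offset + m)
--         if xs[m][:k] < word:
--             return go(offset + m + 1, xs[m + 1:])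
--         return go(offset, xs[:m])
--
--     return go(0, products)
-- ===== Notes on version B (the rewrite author's own statement) =====
-- stated objective: alternative
-- what changed: B replaces A's index-pair while-loop by a recursive divide-and-conquer over shrinking list slices carried with an offset, and replaces A's backward while-walk by counting the consecutive matches in the reversed prefix list; A's dead min_len computation and redundant length test are dropped.
import Mathlib
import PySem

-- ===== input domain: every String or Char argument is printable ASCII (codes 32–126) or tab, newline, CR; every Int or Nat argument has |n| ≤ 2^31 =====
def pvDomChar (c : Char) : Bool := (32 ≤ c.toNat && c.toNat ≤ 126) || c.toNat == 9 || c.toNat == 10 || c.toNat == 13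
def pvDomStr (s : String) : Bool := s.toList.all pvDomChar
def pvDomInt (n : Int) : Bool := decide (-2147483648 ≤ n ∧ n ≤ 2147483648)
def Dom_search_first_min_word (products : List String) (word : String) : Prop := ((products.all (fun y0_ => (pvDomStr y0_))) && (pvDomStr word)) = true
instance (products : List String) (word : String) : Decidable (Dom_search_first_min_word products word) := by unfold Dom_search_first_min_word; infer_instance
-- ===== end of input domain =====

-- B: recursive divide-and-conquer on shrinking list slices carried with an offset, with the
-- run start obtained by counting matches in the reversed prefix list (alternative; not faster).


-- ===== PORT A =====
-- inner loop 'while l >= 0 and len(products[l]) >= len(word) and products[l][:len(word)] == word: l -= 1; l += 1; return l'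
-- The Nat argument is pure fuel (the loop runs at most l+2 steps, and every call supplies more); the 0-case is unreachable.
-- products[l] is always in range when 0 ≤ l here, so the .getD "" default is never used.
def pvAWalk (products : List String) (word : String) : Nat → Int → Int
  | 0, l => l + 1
  | fuel+1, l =>
    if 0 ≤ l ∧ PySem.Str.len ((PySem.List.pyGet? products l).getD "") ≥ PySem.Str.len word ∧
         PySem.Str.slice ((PySem.List.pyGet? products l).getD "") none (some (PySem.Str.len word : Int)) = word
    then pvAWalk products word fuel (l - 1)
    else l + 1

-- outer 'while s <= e' loop; the interval shrinks every iteration, so fuel = len(products)+1 is never exhausted.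
-- products[m] is always in range when s ≤ e (0 ≤ s, e < len), so .getD "" is never used.
def pvALoop (products : List String) (word : String) : Nat → Int → Int → Int
  | 0, _, _ => -1
  | fuel+1, s, e =>
    if s ≤ e then
      let m := s + PySem.Int.floordiv (e - s) 2
      let p := (PySem.List.pyGet? products m).getD ""
      let _min_len := min (PySem.Str.len word) (PySem.Str.len p)   -- dead in A too
      let pre := PySem.Str.slice p none (some (PySem.Str.len word : Int))
      if pre = word then pvAWalk products word ((m + 1).toNat + 1) (m - 1)
      else if pre < word then pvALoop products word fuel (m + 1) e
      else pvALoop products word fuel s (m - 1)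
    else -1

def search_first_min_word (products : List String) (word : String) : Int :=
  pvALoop products word (products.length + 1) 0 ((products.length : Int) - 1)

-- ===== PORT B =====
-- matches(p): p[:k] == word
def pvMatches (word p : String) : Bool :=
  PySem.Str.slice p none (some (PySem.Str.len word : Int)) == word

-- the for-loop of start_of_run with its break: count leading matches of a list
def pvCntLoop (word : String) : List String → Int → Int
  | [], cnt => cnt
  | p :: rest, cnt => if pvMatches word p then pvCntLoop word rest (cnt + 1) else cnt

-- start_of_run(j); 'products[:j+1][::-1]' = slice, then [::-1] is exact list reversal
def pvStartOfRun (products : List String) (word : String) (j : Int) : Int :=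
  j + 1 - pvCntLoop word ((PySem.List.slice products none (some (j + 1))).reverse) 0

-- go(offset, xs): divide and conquer on the sublist; the Nat argument is pure fuel
-- (each call shrinks xs, and the top call supplies more fuel than len(products)), never exhausted.
def pvBGo (products : List String) (word : String) : Nat → Int → List String → Int
  | 0, _, _ => -1
  | fuel+1, offset, xs =>
    if xs.isEmpty then -1
    else
      let m : Int := PySem.Int.floordiv ((xs.length : Int) - 1) 2
      if pvMatches word ((PySem.List.pyGet? xs m).getD "") then
        pvStartOfRun products word (offset + m)
      else if PySem.Str.slice ((PySem.List.pyGet? xs m).getD "") none (some (PySem.Str.len word : Int)) < word then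
        pvBGo products word fuel (offset + m + 1) (PySem.List.slice xs (some (m + 1)) none)
      else
        pvBGo products word fuel offset (PySem.List.slice xs none (some m))

def search_first_min_word_alt (products : List String) (word : String) : Int :=
  pvBGo products word (products.length + 1) 0 products

-- ===== PRECONDITION & SPEC =====
def Spec_search_first_min_word (products : List String) (word : String) (out : Int) : Prop := out = search_first_min_word_alt products word
instance (products : List String) (word : String) (out : Int) : Decidable (Spec_search_first_min_word products word out) := by unfold Spec_search_first_min_word; infer_instance

-- ===== CLAIM (what is proved, stated in full; the proofs are below) =====
def Claim_equal_search_first_min_word : Prop := ∀ (products : List String) (word : String), Dom_search_first_min_word products word → Spec_search_first_min_word products word (search_first_min_word products word)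

-- ===== LEMMAS AND PROOFS =====

-- the prefix test at index i, shared shape of both ports
def pvGood (products : List String) (word : String) (i : Int) : Prop :=
  PySem.Str.slice ((PySem.List.pyGet? products i).getD "") none (some (PySem.Str.len word : Int)) = word

-- a string whose word-length prefix equals word is at least as long as word
theorem pvGood_len {products : List String} {word : String} {i : Int}
    (h : pvGood products word i) :
    PySem.Str.len ((PySem.List.pyGet? products i).getD "") ≥ PySem.Str.len word := by
  unfold pvGood at h
  set p := (PySem.List.pyGet? products i).getD "" with hp
  have := congrArg String.toList h
  simp only [PySem.Str.toList_slice, PySem.Chars.slice_eq_listSlice] at this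
  have h0 : (0:Int) ≤ PySem.Str.len word := by rw [PySem.Str.len_eq]; positivity
  rw [PySem.List.slice_to (xs := p.toList) h0] at this
  have hlen := congrArg List.length this
  simp only [List.length_take, PySem.Str.len_eq] at hlen ⊢
  omega

-- accumulator lemma for the counting loop
theorem pvCntLoop_acc (word : String) :
    ∀ (xs : List String) (c : Int), pvCntLoop word xs c = c + pvCntLoop word xs 0 := by
  intro xs
  induction xs with
  | nil => intro c; simp [pvCntLoop]
  | cons p rest ih =>
    intro c
    by_cases h : pvMatches word p
    · simp only [pvCntLoop, if_pos h]; rw [ih (c + 1), ih (0 + 1)]; ring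
    · simp [pvCntLoop, if_neg h]

-- pyGet? at a nonnegative index is plain list indexing
theorem pvGetNonneg (l : List String) (i : Int) (h0 : 0 ≤ i) :
    PySem.List.pyGet? l i = l[i.toNat]? := by
  rw [show i = ((i.toNat : Nat) : Int) from by omega, PySem.List.pyGet?_natCast]
  congr 1

-- A's backward walk from l equals (l+1) minus B's count of consecutive matches ending at l
theorem pvWalk_eq_cnt (products : List String) (word : String) :
    ∀ (fuel : Nat) (l : Int), -1 ≤ l → l < (products.length : Int) → (l + 1).toNat < fuel →
      pvAWalk products word fuel l =
        l + 1 - pvCntLoop word ((products.take (l + 1).toNat).reverse) 0 := by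
  intro fuel
  induction fuel with
  | zero => intro l _ _ hf; omega
  | succ fuel ih =>
    intro l hl hlen hf
    rw [pvAWalk]
    rcases lt_or_ge l 0 with hneg | hpos
    · have hl0 : l = -1 := by omega
      rw [if_neg (fun hc => by omega), hl0]
      simp [pvCntLoop]
    · -- 0 ≤ l < len: products.take (l+1) ends with products[l.toNat]
      have hlt : l.toNat < products.length := by omega
      have htake : products.take (l + 1).toNat = products.take l.toNat ++ [products[l.toNat]] := by
        have : (l + 1).toNat = l.toNat + 1 := by omega
        rw [this, List.take_add_one, List.getElem?_eq_getElem hlt]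
        rfl
      have hget : (PySem.List.pyGet? products l).getD "" = products[l.toNat] := by
        rw [pvGetNonneg products l hpos, List.getElem?_eq_getElem hlt]
        rfl
      rw [htake, List.reverse_append]
      simp only [List.reverse_cons, List.reverse_nil, List.nil_append, List.cons_append]
      by_cases hg : pvGood products word l
      · have hg' : PySem.Str.slice products[l.toNat] none (some (PySem.Str.len word : Int)) = word := by
          unfold pvGood at hg; rw [hget] at hg; exact hg
        have hgb : pvMatches word products[l.toNat] = true := by
          unfold pvMatches; rw [hg']; exact beq_self_eq_true word
        rw [if_pos ⟨hpos, pvGood_len hg, by rw [hget]; exact hg'⟩]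
        rw [show pvCntLoop word (products[l.toNat] :: (products.take l.toNat).reverse) 0 =
              pvCntLoop word ((products.take l.toNat).reverse) 1 by
            simp [pvCntLoop, hgb]]
        rw [pvCntLoop_acc word ((products.take l.toNat).reverse) 1]
        have h := ih (l - 1) (by omega) (by omega) (by omega)
        rw [show (l - 1 + 1).toNat = l.toNat by omega] at h
        rw [h]; ring
      · have hgb : pvMatches word products[l.toNat] = false := by
          unfold pvMatches
          simp only [beq_eq_false_iff_ne, ne_eq]
          intro hc
          exact hg (by unfold pvGood; rw [hget]; exact hc)
        rw [if_neg (fun hc => hg (by unfold pvGood; exact hc.2.2))]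
        rw [show pvCntLoop word (products[l.toNat] :: (products.take l.toNat).reverse) 0 = 0 by
            simp [pvCntLoop, hgb]]
        ring

-- indexing into the current segment = indexing into products
theorem pvSeg_get (l : List String) (a n i : Nat) (hi : i < n) (_hlen : a + i < l.length) :
    ((l.drop a).take n)[i]? = l[a + i]? := by
  rw [List.getElem?_take_of_lt hi, List.getElem?_drop]

-- the two searches coincide on segments: pvALoop on [s,e] = pvBGo on products[s..e] with offset s
theorem pvLoop_eq_go (products : List String) (word : String) :
    ∀ (fa fb : Nat) (s e : Int), 0 ≤ s → e < (products.length : Int) →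
      (e - s + 1).toNat < fa → (e - s + 1).toNat < fb →
      pvALoop products word fa s e =
        pvBGo products word fb s ((products.drop s.toNat).take (e - s + 1).toNat) := by
  intro fa
  induction fa with
  | zero => intro fb s e _ _ hfa _; omega
  | succ fa ih =>
    intro fb s e hs he hfa hfb
    obtain ⟨fb', rfl⟩ : ∃ fb', fb = fb' + 1 := ⟨fb - 1, by omega⟩
    set seg := (products.drop s.toNat).take (e - s + 1).toNat with hseg
    have hseglen : seg.length = (e - s + 1).toNat := by
      rw [hseg]
      simp only [List.length_take, List.length_drop]
      omega
    rw [pvALoop, pvBGo]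
    by_cases hse : s ≤ e
    · have hne : seg.isEmpty = false := by
        rw [List.isEmpty_eq_false_iff, ← List.length_pos_iff, hseglen]; omega
      rw [if_pos hse, hne]
      simp only [Bool.false_eq_true, if_false]
      -- midpoints agree
      have hmid : PySem.Int.floordiv ((seg.length : Int) - 1) 2 = PySem.Int.floordiv (e - s) 2 := by
        rw [hseglen]; congr 1; omega
      set mr := PySem.Int.floordiv (e - s) 2 with hmr
      obtain ⟨hmr0, hmr1⟩ : 0 ≤ mr ∧ mr ≤ e - s := by
        rw [hmr]
        simp only [PySem.Int.floordiv, Int.fdiv_eq_ediv]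
        omega
      -- the probed elements agree
      have hgete : (PySem.List.pyGet? seg mr).getD "" = (PySem.List.pyGet? products (s + mr)).getD "" := by
        rw [pvGetNonneg seg mr hmr0, pvGetNonneg products (s + mr) (by omega), hseg,
          pvSeg_get products s.toNat _ mr.toNat (by omega) (by omega),
          show s.toNat + mr.toNat = (s + mr).toNat from by omega]
      simp only [hmid, hgete]
      set p := (PySem.List.pyGet? products (s + mr)).getD "" with hp
      by_cases hg : PySem.Str.slice p none (some (PySem.Str.len word : Int)) = word
      · have hgb : pvMatches word p = true := by
          unfold pvMatches; rw [hg]; exact beq_self_eq_true word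
        rw [if_pos hg, if_pos hgb]
        -- A's walk = B's start_of_run at index s + mr
        unfold pvStartOfRun
        have hw := pvWalk_eq_cnt products word ((s + mr + 1).toNat + 1) (s + mr - 1)
          (by omega) (by omega) (by omega)
        rw [show (s + mr - 1 + 1).toNat = (s + mr).toNat by omega] at hw
        rw [hw]
        rw [PySem.List.slice_to (xs := products) (by omega : (0:Int) ≤ s + mr + 1)]
        -- products[m] matches, so the count over take (m+1) is 1 + count over take m
        have hlt : (s + mr).toNat < products.length := by omega
        have htake : products.take (s + mr + 1).toNat =
            products.take (s + mr).toNat ++ [products[(s + mr).toNat]] := by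
          rw [show (s + mr + 1).toNat = (s + mr).toNat + 1 by omega,
            List.take_add_one, List.getElem?_eq_getElem hlt]
          rfl
        have hpe : p = products[(s + mr).toNat] := by
          rw [hp, pvGetNonneg products (s + mr) (by omega), List.getElem?_eq_getElem hlt]
          rfl
        have hgm : pvMatches word products[(s + mr).toNat] = true := by
          rw [← hpe]; exact hgb
        rw [htake, List.reverse_append]
        simp only [List.reverse_cons, List.reverse_nil, List.nil_append, List.singleton_append]
        rw [show pvCntLoop word (products[(s + mr).toNat] :: (products.take (s + mr).toNat).reverse) 0 =
              pvCntLoop word ((products.take (s + mr).toNat).reverse) 1 by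
            simp [pvCntLoop, hgm]]
        rw [pvCntLoop_acc word ((products.take (s + mr).toNat).reverse) 1]
        ring
      · have hgb : pvMatches word p = false := by
          unfold pvMatches
          simp only [beq_eq_false_iff_ne, ne_eq]
          exact hg
        rw [if_neg hg, hgb]
        simp only [Bool.false_eq_true, if_false]
        by_cases hlt : PySem.Str.slice p none (some (PySem.Str.len word : Int)) < word
        · rw [if_pos hlt, if_pos hlt]
          -- right half: xs[m+1:] = segment (s+mr+1 .. e)
          have hdrop : PySem.List.slice seg (some (mr + 1)) none =
              (products.drop (s + mr + 1).toNat).take (e - (s + mr + 1) + 1).toNat := by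
            rw [PySem.List.slice_from (xs := seg) (by omega : (0:Int) ≤ mr + 1), hseg,
              List.drop_take, List.drop_drop]
            congr 1
            · omega
            · congr 1
              omega
          rw [hdrop]
          exact ih fb' (s + mr + 1) e (by omega) he (by omega) (by omega)
        · rw [if_neg hlt, if_neg hlt]
          -- left half: xs[:m] = segment (s .. s+mr-1)
          have htk : PySem.List.slice seg none (some mr) =
              (products.drop s.toNat).take (s + mr - 1 - s + 1).toNat := by
            rw [PySem.List.slice_to (xs := seg) (by omega : (0:Int) ≤ mr), hseg, List.take_take]
            congr 1
            omega
          rw [htk]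
          exact ih fb' s (s + mr - 1) hs (by omega) (by omega) (by omega)
    · have hemp : seg.isEmpty = true := by
        rw [List.isEmpty_iff_length_eq_zero, hseglen]; omega
      rw [if_neg hse, hemp, if_pos rfl]

-- ===== VERDICT (by name: the statement is the Claim_ definition above) =====
theorem search_first_min_word_spec : Claim_equal_search_first_min_word := by
  intro products word _
  unfold Spec_search_first_min_word search_first_min_word search_first_min_word_alt
  have h := pvLoop_eq_go products word (products.length + 1) (products.length + 1) 0
    ((products.length : Int) - 1) le_rfl (by omega) (by omega) (by omega)
  simpa using h
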